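-- pv_equiv track=rewrite | github.com/wellzero/quant_free | quant_free/utils/xq_parse_js.py | deduplicate_values
-- ===== SOURCE A (Python) =====
-- def deduplicate_values(data_dict):
--     """
--     Deduplicate values in the dictionary for the same keys, keeping the first occurrence.
--
--     Parameters:
--     data_dict (dict): The input dictionary with potential duplicate keys.
--
--     Returns:
--     dict: The processed dictionary with deduplicated values.
--     """
--
--     deduped_dict = {}
--     for key, value in data_dict.items():
--         for key1, value1 in value.items():
--             for key2, value2 in value1.items():
--                 if key2 not in deduped_dict:
--                     deduped_dict[key2] = value2
--                 else:
--                     data_dict[key][key1][key2] = deduped_dict[key2]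
--     return data_dict
-- ===== SOURCE B (Python) =====
-- def deduplicate_values(data_dict):
--     # Pass 1: record the first value seen for each innermost key, in iteration order.
--     seen = {}
--     for value in data_dict.values():
--         for value1 in value.values():
--             for key2, value2 in value1.items():
--                 seen.setdefault(key2, value2)
--     # Pass 2: rewrite every innermost value to the first-seen one, in place.
--     for value in data_dict.values():
--         for value1 in value.values():
--             for key2 in value1:
--                 value1[key2] = seen[key2]
--     return data_dict
-- ===== Notes on version B (the rewrite author's own statement) =====
-- stated objective: alternative
-- what changed: A's single fused pass that interleaves building the first-seen table with conditional in-place overwrites is replaced by two clean passes: one pass builds the first-occurrence map with setdefault, a second pass unconditionally rewrites every innermost value from that map.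
import Mathlib
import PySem

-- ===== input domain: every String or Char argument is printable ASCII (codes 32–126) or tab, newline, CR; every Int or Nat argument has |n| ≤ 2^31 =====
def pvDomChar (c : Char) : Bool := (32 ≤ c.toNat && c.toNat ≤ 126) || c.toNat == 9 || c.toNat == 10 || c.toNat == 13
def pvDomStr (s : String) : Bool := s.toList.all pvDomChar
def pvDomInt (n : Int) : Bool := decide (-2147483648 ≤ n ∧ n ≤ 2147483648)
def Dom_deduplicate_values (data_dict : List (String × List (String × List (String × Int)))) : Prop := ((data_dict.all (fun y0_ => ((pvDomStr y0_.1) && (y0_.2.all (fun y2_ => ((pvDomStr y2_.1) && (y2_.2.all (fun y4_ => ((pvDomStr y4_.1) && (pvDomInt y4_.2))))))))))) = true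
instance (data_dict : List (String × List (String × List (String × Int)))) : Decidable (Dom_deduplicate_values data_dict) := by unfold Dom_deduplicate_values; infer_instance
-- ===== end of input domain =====

-- B replaces A's fused conditional pass by a first-occurrence-table pass plus a uniform
-- rewrite pass (objective: alternative decomposition, same cost).  Both Pythons mutate
-- data_dict in place and return it; the ports thread/rebuild the structure purely, which is
-- exact for the return value (each innermost entry is read before it can be overwritten).

-- ===== PORT A =====
-- `d[k] = f(d[k])` on an (insertion-ordered, unique-key) dict, as first-match update:
def setk {α : Type} (l : List (String × α)) (k : String) (f : α → α) : List (String × α) :=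
  match l with
  | [] => []
  | (k', v) :: rest => if k' == k then (k', f v) :: rest else (k', v) :: setk rest k f

-- body of A's innermost loop: state = (deduped_dict, data_dict)
def stepA (key key1 : String) (st : PySem.Dict String Int × List (String × List (String × List (String × Int)))) (p : String × Int) : PySem.Dict String Int × List (String × List (String × List (String × Int))) :=
  if !st.1.contains p.1 then
    (st.1.insert p.1 p.2, st.2)
  else
    -- data_dict[key][key1][key2] = deduped_dict[key2]; getD is exact: key2 ∈ deduped here
    (st.1, setk st.2 key (fun v => setk v key1 (fun v1 => setk v1 p.1 (fun _ => st.1.getD p.1 0))))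

-- A's single pass over data_dict.items(); iteration reads the original entries (in Python
-- every entry is overwritten only at its own step, after being read).
def deduplicate_values (data_dict : List (String × List (String × List (String × Int)))) : List (String × List (String × List (String × Int))) :=
  (data_dict.foldl (fun st kv =>
      kv.2.foldl (fun st kv1 =>
        kv1.2.foldl (stepA kv.1 kv1.1) st) st)
    ((PySem.Dict.empty : PySem.Dict String Int), data_dict)).2

-- ===== PORT B =====
-- Pass 1: first value seen per innermost key (setdefault), in iteration order.
def bSeen (data_dict : List (String × List (String × List (String × Int)))) : PySem.Dict String Int :=
  data_dict.foldl (fun s kv =>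
    kv.2.foldl (fun s kv1 =>
      kv1.2.foldl (fun s p => s.setdefault p.1 p.2) s) s) PySem.Dict.empty

-- Pass 2: rewrite every innermost value from the table (seen[key2]; the default is never
-- used since pass 1 recorded every key — exact for Python's seen[key2]).
def deduplicate_values_alt (data_dict : List (String × List (String × List (String × Int)))) : List (String × List (String × List (String × Int))) :=
  let seen := bSeen data_dict
  data_dict.map (fun kv => (kv.1, kv.2.map (fun kv1 => (kv1.1, kv1.2.map (fun p => (p.1, seen.getD p.1 p.2))))))

-- ===== PRECONDITION & SPEC =====
-- Pre_ only excludes association lists with a duplicated key inside one dict level: such a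
-- value cannot reach the Python function (its argument and nested values are dicts, whose
-- keys are unique per level), so keyed in-place assignment has no canonical meaning there.
def Pre_deduplicate_values (data_dict : List (String × List (String × List (String × Int)))) : Prop :=
  (data_dict.map (·.1)).Nodup ∧ ∀ kv ∈ data_dict, (kv.2.map (·.1)).Nodup ∧ ∀ kv1 ∈ kv.2, (kv1.2.map (·.1)).Nodup
instance (data_dict : List (String × List (String × List (String × Int)))) : Decidable (Pre_deduplicate_values data_dict) := by unfold Pre_deduplicate_values; infer_instance

def pvWitness_deduplicate_values : (List (String × List (String × List (String × Int)))) :=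
  [("a", [("x", [("k", 1), ("m", 2)]), ("y", [("k", 5)])]), ("b", [("z", [("m", 7), ("n", 3)])])]

def Spec_deduplicate_values (data_dict : List (String × List (String × List (String × Int)))) (out : List (String × List (String × List (String × Int)))) : Prop := out = deduplicate_values_alt data_dict
instance (data_dict : List (String × List (String × List (String × Int)))) (out : List (String × List (String × List (String × Int)))) : Decidable (Spec_deduplicate_values data_dict out) := by unfold Spec_deduplicate_values; infer_instance

-- ===== CLAIM (what is proved, stated in full; the proofs are below) =====
def Claim_equal_deduplicate_values : Prop := ∀ (data_dict : List (String × List (String × List (String × Int)))), Dom_deduplicate_values data_dict → Pre_deduplicate_values data_dict → Spec_deduplicate_values data_dict (deduplicate_values data_dict)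

-- ===== LEMMAS AND PROOFS =====

-- abbreviations for the three nesting levels (proof-side only)
abbrev DD1 : Type := List (String × Int)
abbrev DD2 : Type := List (String × DD1)
abbrev DD3 : Type := List (String × DD2)

-- the seen-table built over one / two / three levels
def seen1 (s : PySem.Dict String Int) (l : DD1) : PySem.Dict String Int :=
  l.foldl (fun s p => s.setdefault p.1 p.2) s
def seen2 (s : PySem.Dict String Int) (l : DD2) : PySem.Dict String Int :=
  l.foldl (fun s q => seen1 s q.2) s
def seen3 (s : PySem.Dict String Int) (l : DD3) : PySem.Dict String Int :=
  l.foldl (fun s kv => seen2 s kv.2) s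

-- rewriting each innermost value from a table
def rw1 (s : PySem.Dict String Int) (l : DD1) : DD1 := l.map (fun p => (p.1, s.getD p.1 p.2))
def rw2 (s : PySem.Dict String Int) (l : DD2) : DD2 := l.map (fun q => (q.1, rw1 s q.2))
def rw3 (s : PySem.Dict String Int) (l : DD3) : DD3 := l.map (fun kv => (kv.1, rw2 s kv.2))

theorem alt_eq_rw3 (dd : DD3) : deduplicate_values_alt dd = rw3 (seen3 PySem.Dict.empty dd) dd := rfl

theorem setdefault_not_contains (s : PySem.Dict String Int) (k : String) (v : Int)
    (hc : s.contains k = false) : s.setdefault k v = s.insert k v := by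
  apply PySem.Dict.ext
  rw [PySem.Dict.items_insert_of_not_contains s v hc]
  simp [PySem.Dict.setdefault, hc]

-- s' extends s: every binding of s is still in s'
def DExt (s s' : PySem.Dict String Int) : Prop := ∀ k v, s.get? k = some v → s'.get? k = some v

theorem DExt_setdefault (s : PySem.Dict String Int) (k : String) (v : Int) : DExt s (s.setdefault k v) := by
  intro k0 v0 h
  simp only [PySem.Dict.setdefault]
  split
  · exact h
  · simp only [PySem.Dict.get?] at h ⊢
    rw [List.find?_append]
    simp only [Option.map_eq_some_iff] at h
    obtain ⟨p, hp, hv⟩ := h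
    simp [hp, hv]

theorem DExt_seen1 (l : DD1) : ∀ s, DExt s (seen1 s l) := by
  induction l with
  | nil => intro s k v h; exact h
  | cons p t ih =>
      intro s k v h
      exact ih (s.setdefault p.1 p.2) k v (DExt_setdefault s p.1 p.2 k v h)

theorem DExt_seen2 (l : DD2) : ∀ s, DExt s (seen2 s l) := by
  induction l with
  | nil => intro s k v h; exact h
  | cons q t ih =>
      intro s k v h
      exact ih (seen1 s q.2) k v (DExt_seen1 q.2 s k v h)

theorem DExt_seen3 (l : DD3) : ∀ s, DExt s (seen3 s l) := by
  induction l with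
  | nil => intro s k v h; exact h
  | cons kv t ih =>
      intro s k v h
      exact ih (seen2 s kv.2) k v (DExt_seen2 kv.2 s k v h)

theorem some_setdefault_self (s : PySem.Dict String Int) (k : String) (v : Int) :
    ∃ w, (s.setdefault k v).get? k = some w := by
  by_cases hc : s.contains k = true
  · obtain ⟨w, hw⟩ := Option.isSome_iff_exists.mp (by rw [← PySem.Dict.contains_eq_isSome_get? s k]; exact hc)
    exact ⟨w, DExt_setdefault s k v k w hw⟩
  · rw [setdefault_not_contains s k v (by simpa using hc)]
    exact ⟨v, PySem.Dict.get?_insert_self s k v⟩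

theorem some_seen1 (l : DD1) : ∀ s, ∀ p ∈ l, ∃ w, (seen1 s l).get? p.1 = some w := by
  induction l with
  | nil => intro s p hp; cases hp
  | cons q t ih =>
      intro s p hp
      rcases List.mem_cons.mp hp with hp | hp
      · subst hp
        obtain ⟨w, hw⟩ := some_setdefault_self s p.1 p.2
        exact ⟨w, DExt_seen1 t _ _ _ hw⟩
      · exact ih _ p hp

theorem some_seen2 (l : DD2) : ∀ s, ∀ q ∈ l, ∀ p ∈ q.2, ∃ w, (seen2 s l).get? p.1 = some w := by
  induction l with
  | nil => intro s q hq; cases hq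
  | cons r t ih =>
      intro s q hq p hp
      rcases List.mem_cons.mp hq with hq | hq
      · subst hq
        obtain ⟨w, hw⟩ := some_seen1 q.2 s p hp
        exact ⟨w, DExt_seen2 t _ _ _ hw⟩
      · exact ih _ q hq p hp

theorem rw1_ext (v : DD1) (s s' : PySem.Dict String Int)
    (hsome : ∀ p ∈ v, ∃ w, s.get? p.1 = some w) (hext : DExt s s') :
    rw1 s' v = rw1 s v := by
  simp only [rw1]
  apply List.map_congr_left
  intro p hp
  obtain ⟨w, hw⟩ := hsome p hp
  rw [PySem.Dict.getD_of_get?_eq_some s' p.2 (hext _ _ hw), PySem.Dict.getD_of_get?_eq_some s p.2 hw]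

theorem rw2_ext (v : DD2) (s s' : PySem.Dict String Int)
    (hsome : ∀ q ∈ v, ∀ p ∈ q.2, ∃ w, s.get? p.1 = some w) (hext : DExt s s') :
    rw2 s' v = rw2 s v := by
  simp only [rw2]
  apply List.map_congr_left
  intro q hq
  rw [rw1_ext q.2 s s' (hsome q hq) hext]

theorem setk_append_not_mem {α : Type} (a b : List (String × α)) (k : String) (f : α → α)
    (h : k ∉ a.map (·.1)) : setk (a ++ b) k f = a ++ setk b k f := by
  induction a with
  | nil => rfl
  | cons p t ih =>
      simp only [List.map_cons, List.mem_cons, not_or] at h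
      simp only [List.cons_append, setk]
      rw [if_neg (by simpa using fun e => h.1 e.symm), ih h.2]

theorem setk_cons_self {α : Type} (k : String) (v : α) (rest : List (String × α)) (f : α → α) :
    setk ((k, v) :: rest) k f = (k, f v) :: rest := by
  simp [setk]

-- invariant for A's innermost loop
theorem loop1 (key key1 : String) (l : DD1) :
    ∀ (s : PySem.Dict String Int) (A F : DD3) (B E : DD2) (C : DD1),
      key ∉ A.map (·.1) → key1 ∉ B.map (·.1) →
      (C.map (·.1) ++ l.map (·.1)).Nodup →
      (∀ p ∈ C, ∃ w, s.get? p.1 = some w) →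
      l.foldl (stepA key key1) (s, A ++ (key, B ++ (key1, C ++ l) :: E) :: F)
        = (seen1 s l, A ++ (key, B ++ (key1, C ++ rw1 (seen1 s l) l) :: E) :: F) := by
  induction l with
  | nil => intro s A F B E C _ _ _ _; simp [seen1, rw1]
  | cons p t ih =>
      intro s A F B E C hA hB hnd hC
      have hk2C : p.1 ∉ C.map (·.1) := by
        intro hmem
        exact (List.nodup_append.mp hnd).2.2 _ hmem _ (by simp) rfl
      have hassoc : ∀ (x : String × Int), C ++ x :: t = (C ++ [x]) ++ t := by simp
      by_cases hc : s.contains p.1 = true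
      · -- duplicate: in-place assignment
        obtain ⟨w, hw⟩ := Option.isSome_iff_exists.mp (by rw [← PySem.Dict.contains_eq_isSome_get? s p.1]; exact hc)
        have hstep : stepA key key1 (s, A ++ (key, B ++ (key1, C ++ p :: t) :: E) :: F) p
            = (s, A ++ (key, B ++ (key1, (C ++ [(p.1, s.getD p.1 0)]) ++ t) :: E) :: F) := by
          simp only [stepA, hc, Bool.not_true, Bool.false_eq_true, if_false]
          rw [setk_append_not_mem _ _ _ _ hA, setk_cons_self,
              setk_append_not_mem _ _ _ _ hB, setk_cons_self,
              setk_append_not_mem _ _ _ _ hk2C]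
          rw [show (p :: t : DD1) = (p.1, p.2) :: t from rfl, setk_cons_self]
          simp
        have hseen : seen1 s (p :: t) = seen1 s t := by
          simp only [seen1, List.foldl_cons]
          rw [show s.setdefault p.1 p.2 = s by simp [PySem.Dict.setdefault, hc]]
        rw [List.foldl_cons, hstep,
            ih s A F B E (C ++ [(p.1, s.getD p.1 0)]) hA hB
              (by simpa using hnd)
              (by intro q hq
                  rcases List.mem_append.mp hq with hq | hq
                  · exact hC q hq
                  · simp only [List.mem_singleton] at hq; subst hq
                    exact ⟨w, by rw [PySem.Dict.getD_of_get?_eq_some s 0 hw]; exact hw⟩),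
            hseen]
        have hget : (seen1 s t).get? p.1 = some w := DExt_seen1 t s _ _ hw
        rw [show rw1 (seen1 s t) (p :: t) = (p.1, s.getD p.1 0) :: rw1 (seen1 s t) t by
          simp only [rw1, List.map_cons]
          rw [PySem.Dict.getD_of_get?_eq_some _ p.2 hget, PySem.Dict.getD_of_get?_eq_some s 0 hw]]
        simp
      · -- first occurrence: record it
        have hc' : s.contains p.1 = false := by simpa using hc
        have hstep : stepA key key1 (s, A ++ (key, B ++ (key1, C ++ p :: t) :: E) :: F) p
            = (s.insert p.1 p.2, A ++ (key, B ++ (key1, (C ++ [p]) ++ t) :: E) :: F) := by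
          simp only [stepA, hc', Bool.not_false, if_true]
          rw [← hassoc]
        have hseen : seen1 s (p :: t) = seen1 (s.insert p.1 p.2) t := by
          simp only [seen1, List.foldl_cons]
          rw [setdefault_not_contains s p.1 p.2 hc']
        rw [List.foldl_cons, hstep,
            ih (s.insert p.1 p.2) A F B E (C ++ [p]) hA hB
              (by simpa using hnd)
              (by intro q hq
                  rcases List.mem_append.mp hq with hq | hq
                  · obtain ⟨w, hw⟩ := hC q hq
                    have hne : q.1 ≠ p.1 := by
                      intro he
                      exact hk2C (he ▸ (List.mem_map.mpr ⟨q, hq, rfl⟩))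
                    exact ⟨w, by rw [PySem.Dict.get?_insert_of_ne s p.2 hne]; exact hw⟩
                  · simp only [List.mem_singleton] at hq; subst hq
                    exact ⟨q.2, PySem.Dict.get?_insert_self s q.1 q.2⟩),
            hseen]
        have hget : (seen1 (s.insert p.1 p.2) t).get? p.1 = some p.2 :=
          DExt_seen1 t _ _ _ (PySem.Dict.get?_insert_self s p.1 p.2)
        rw [show rw1 (seen1 (s.insert p.1 p.2) t) (p :: t)
              = p :: rw1 (seen1 (s.insert p.1 p.2) t) t by
          simp only [rw1, List.map_cons]
          rw [PySem.Dict.getD_of_get?_eq_some _ p.2 hget]]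
        simp

-- invariant for A's middle loop
theorem loop2 (key : String) (l2 : DD2) :
    ∀ (s : PySem.Dict String Int) (A F : DD3) (B : DD2),
      key ∉ A.map (·.1) →
      (B.map (·.1) ++ l2.map (·.1)).Nodup →
      (∀ q ∈ l2, (q.2.map (·.1)).Nodup) →
      l2.foldl (fun st kv1 => kv1.2.foldl (stepA key kv1.1) st) (s, A ++ (key, B ++ l2) :: F)
        = (seen2 s l2, A ++ (key, B ++ rw2 (seen2 s l2) l2) :: F) := by
  induction l2 with
  | nil => intro s A F B _ _ _; simp [seen2, rw2]
  | cons q t ih =>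
      intro s A F B hA hnd hinner
      have hk1B : q.1 ∉ B.map (·.1) := by
        intro hmem
        exact (List.nodup_append.mp hnd).2.2 _ hmem _ (by simp) rfl
      rw [List.foldl_cons]
      have h1 := loop1 key q.1 q.2 s A F B t [] hA hk1B
        (by simpa using hinner q List.mem_cons_self) (by intro p hp; cases hp)
      simp only [List.nil_append] at h1
      rw [show (q :: t : DD2) = (q.1, q.2) :: t from rfl] at *
      rw [h1,
          show B ++ (q.1, rw1 (seen1 s q.2) q.2) :: t = (B ++ [(q.1, rw1 (seen1 s q.2) q.2)]) ++ t by simp,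
          ih (seen1 s q.2) A F (B ++ [(q.1, rw1 (seen1 s q.2) q.2)]) hA
            (by simpa using hnd)
            (by intro r hr; exact hinner r (List.mem_cons_of_mem _ hr))]
      have hseen : seen2 s ((q.1, q.2) :: t) = seen2 (seen1 s q.2) t := rfl
      rw [← hseen,
          show rw2 (seen2 s ((q.1, q.2) :: t)) ((q.1, q.2) :: t)
            = (q.1, rw1 (seen2 s ((q.1, q.2) :: t)) q.2) :: rw2 (seen2 s ((q.1, q.2) :: t)) t by
            simp [rw2],
          hseen,
          rw1_ext q.2 (seen1 s q.2) (seen2 (seen1 s q.2) t)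
            (fun p hp => some_seen1 q.2 s p hp) (DExt_seen2 t _)]
      simp

-- invariant for A's outer loop
theorem loop3 (l3 : DD3) :
    ∀ (s : PySem.Dict String Int) (A : DD3),
      (A.map (·.1) ++ l3.map (·.1)).Nodup →
      (∀ kv ∈ l3, (kv.2.map (·.1)).Nodup ∧ ∀ kv1 ∈ kv.2, (kv1.2.map (·.1)).Nodup) →
      l3.foldl (fun st kv => kv.2.foldl (fun st kv1 => kv1.2.foldl (stepA kv.1 kv1.1) st) st) (s, A ++ l3)
        = (seen3 s l3, A ++ rw3 (seen3 s l3) l3) := by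
  induction l3 with
  | nil => intro s A _ _; simp [seen3, rw3]
  | cons kv t ih =>
      intro s A hnd hinner
      have hkA : kv.1 ∉ A.map (·.1) := by
        intro hmem
        exact (List.nodup_append.mp hnd).2.2 _ hmem _ (by simp) rfl
      rw [List.foldl_cons]
      rw [show (kv :: t : DD3) = (kv.1, kv.2) :: t from rfl] at *
      have h2 := loop2 kv.1 kv.2 s A t [] hkA
        (by simpa using (hinner kv List.mem_cons_self).1)
        (fun q hq => (hinner kv List.mem_cons_self).2 q hq)
      simp only [List.nil_append] at h2
      rw [h2,
          show A ++ (kv.1, rw2 (seen2 s kv.2) kv.2) :: t = (A ++ [(kv.1, rw2 (seen2 s kv.2) kv.2)]) ++ t by simp,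
          ih (seen2 s kv.2) (A ++ [(kv.1, rw2 (seen2 s kv.2) kv.2)])
            (by simpa using hnd)
            (by intro r hr; exact hinner r (List.mem_cons_of_mem _ hr))]
      have hseen : seen3 s ((kv.1, kv.2) :: t) = seen3 (seen2 s kv.2) t := rfl
      rw [← hseen,
          show rw3 (seen3 s ((kv.1, kv.2) :: t)) ((kv.1, kv.2) :: t)
            = (kv.1, rw2 (seen3 s ((kv.1, kv.2) :: t)) kv.2) :: rw3 (seen3 s ((kv.1, kv.2) :: t)) t by
            simp [rw3],
          hseen,
          rw2_ext kv.2 (seen2 s kv.2) (seen3 (seen2 s kv.2) t)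
            (fun q hq p hp => some_seen2 kv.2 s q hq p hp) (DExt_seen3 t _)]
      simp

-- ===== VERDICT (by name: the statement is the Claim_ definition above) =====
theorem deduplicate_values_spec : Claim_equal_deduplicate_values := by
  intro dd _ hpre
  unfold Spec_deduplicate_values
  rw [alt_eq_rw3]
  unfold deduplicate_values
  have h := loop3 dd PySem.Dict.empty [] (by simpa using hpre.1)
    (fun kv hkv => hpre.2 kv hkv)
  simp only [List.nil_append] at h
  rw [h]
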